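-- pv_equiv track=rewrite | github.com/KyubumShin/AQ | making/s4112.py | find
-- ===== SOURCE A (Python) =====
-- def find(x):
--     low, high = 1, 141
--     mid = (low + high)//2
--     while (mid-1)*mid//2 >= x or x > mid*(mid+1)//2:
--         if x > mid*(mid+1)//2:
--             low = mid + 1
--         else:
--             high = mid
--         mid = (low + high)//2
--     return (mid, x - mid*(mid-1)//2)
-- ===== SOURCE B (Python) =====
-- def find(x):
--     row, total = 1, 1
--     while total < x:
--         row += 1
--         total += row
--     return (row, x - (total - row))
-- ===== Notes on version B (the rewrite author's own statement) =====
-- stated objective: simpler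
-- what changed: Replaces the hard-coded binary search over low/high/mid with a single accumulating linear scan over rows (no midpoint arithmetic, no bounds); Pre_ excludes x <= 0 and x > 10011, where A's while-loop never terminates.
-- outside the precondition, e.g. on find(0): A does not finish within the time limit, B returns (1, 0); on find(10012): A does not finish within the time limit, B returns (142, 1)
import Mathlib
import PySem

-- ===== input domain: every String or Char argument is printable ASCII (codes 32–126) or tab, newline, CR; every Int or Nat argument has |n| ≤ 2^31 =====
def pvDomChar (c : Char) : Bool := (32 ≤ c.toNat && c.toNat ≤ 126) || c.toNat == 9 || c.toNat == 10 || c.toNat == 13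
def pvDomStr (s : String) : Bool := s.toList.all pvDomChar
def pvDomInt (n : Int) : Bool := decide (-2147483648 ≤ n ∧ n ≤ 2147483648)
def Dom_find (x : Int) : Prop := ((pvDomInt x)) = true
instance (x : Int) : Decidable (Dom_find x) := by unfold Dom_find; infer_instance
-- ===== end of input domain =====

-- B replaces A's hard-coded binary search with a plain accumulating linear scan; objective: simpler.

-- ===== PORT A =====
-- Python's while-loop, fuel-bounded: on 1 ≤ x ≤ 10011 the search interval shrinks every
-- iteration, so fuel 200 is never exhausted there; outside Pre_ the Python loop diverges.
def findLoop (x low high mid : Int) : Nat → Int × Int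
  | 0 => (mid, x - PySem.Int.floordiv (mid*(mid-1)) 2)
  | fuel+1 =>
    if PySem.Int.floordiv ((mid-1)*mid) 2 ≥ x ∨ x > PySem.Int.floordiv (mid*(mid+1)) 2 then
      if x > PySem.Int.floordiv (mid*(mid+1)) 2 then
        findLoop x (mid+1) high (PySem.Int.floordiv ((mid+1)+high) 2) fuel
      else
        findLoop x low mid (PySem.Int.floordiv (low+mid) 2) fuel
    else (mid, x - PySem.Int.floordiv (mid*(mid-1)) 2)

def find (x : Int) : Int × Int :=
  findLoop x 1 141 (PySem.Int.floordiv (1+141) 2) 200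

-- ===== PORT B =====
-- B's while-loop, fuel-bounded: row reaches at most 141 on Pre_, so fuel 2000 is never exhausted there.
def findAltLoop (x row total : Int) : Nat → Int × Int
  | 0 => (row, x - (total - row))
  | fuel+1 =>
    if total < x then findAltLoop x (row+1) (total+(row+1)) fuel
    else (row, x - (total - row))

def find_alt (x : Int) : Int × Int := findAltLoop x 1 1 2000

-- ===== PRECONDITION & SPEC =====
-- Pre_ excludes exactly x ≤ 0 and x > 10011 = 141·142/2: there A's while-loop never
-- terminates (A returns no value), so nothing can be claimed about A outside Pre_.
def Pre_find (x : Int) : Prop := 1 ≤ x ∧ x ≤ 10011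
instance (x : Int) : Decidable (Pre_find x) := by unfold Pre_find; infer_instance
def pvWitness_find : Int := 5

def Spec_find (x : Int) (out : Int × Int) : Prop := out = find_alt x
instance (x : Int) (out : Int × Int) : Decidable (Spec_find x out) := by unfold Spec_find; infer_instance

-- ===== CLAIM (what is proved, stated in full; the proofs are below) =====
def Claim_equal_find : Prop := ∀ (x : Int), Dom_find x → Pre_find x → Spec_find x (find x)

-- ===== LEMMAS AND PROOFS =====

-- T m = m-th triangular number (as the Python programs compute it, with floor division).
def T (m : Int) : Int := PySem.Int.floordiv (m*(m+1)) 2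

theorem T_def (m : Int) : 2 * T m = m * (m+1) := by
  obtain ⟨k, hk⟩ := Int.even_mul_succ_self m
  unfold T
  rw [PySem.Int.floordiv_eq_ediv_of_pos (by norm_num)]
  omega

theorem T_succ (r : Int) : T (r+1) = T r + (r+1) := by
  have h1 := T_def r
  have h2 := T_def (r+1)
  nlinarith [h1, h2]

theorem T_mono {a b : Int} (ha : 0 ≤ a) (hab : a ≤ b) : T a ≤ T b := by
  have h1 := T_def a
  have h2 := T_def b
  nlinarith [h1, h2]

-- the characterising property of the answer
def Good (x : Int) (p : Int × Int) : Prop :=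
  1 ≤ p.1 ∧ T (p.1 - 1) < x ∧ x ≤ T p.1 ∧ p.2 = x - T (p.1 - 1)

theorem Good_unique {x : Int} {p q : Int × Int} (hp : Good x p) (hq : Good x q) : p = q := by
  obtain ⟨hp1, hp2, hp3, hp4⟩ := hp
  obtain ⟨hq1, hq2, hq3, hq4⟩ := hq
  have h1 : p.1 = q.1 := by
    by_contra hne
    rcases lt_or_gt_of_ne hne with h | h
    · have := T_mono (a := p.1) (b := q.1 - 1) (by omega) (by omega); omega
    · have := T_mono (a := q.1) (b := p.1 - 1) (by omega) (by omega); omega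
  have : p.2 = q.2 := by rw [hp4, hq4, h1]
  exact Prod.ext h1 this

theorem B_loop_good (fuel : Nat) : ∀ (x row total : Int),
    1 ≤ row → total = T row → T (row - 1) < x → x ≤ T (row + fuel) →
    Good x (findAltLoop x row total fuel) := by
  induction fuel with
  | zero =>
    intro x row total h1 h2 h3 h4
    rw [Nat.cast_zero, add_zero] at h4
    have hts := T_succ (row - 1)
    rw [show row - 1 + 1 = row from by ring] at hts
    simp only [findAltLoop]
    exact ⟨h1, h3, by dsimp only; omega, by dsimp only; omega⟩
  | succ n ih =>
    intro x row total h1 h2 h3 h4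
    have hts := T_succ (row - 1)
    rw [show row - 1 + 1 = row from by ring] at hts
    rw [show row + ((n : Nat) + 1 : Nat) = (row + 1) + (n : Nat) from by push_cast; ring] at h4
    simp only [findAltLoop]
    split
    · rename_i hlt
      apply ih x (row+1) (total+(row+1)) (by omega)
      · rw [T_succ]; omega
      · rw [show row + 1 - 1 = row from by ring]; omega
      · exact h4
    · rename_i hge
      exact ⟨h1, h3, by dsimp only; omega, by dsimp only; omega⟩

theorem A_loop_good (fuel : Nat) : ∀ (x low high : Int),
    1 ≤ low → low ≤ high → T (low - 1) < x → x ≤ T high → (high - low).toNat < fuel →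
    Good x (findLoop x low high (PySem.Int.floordiv (low + high) 2) fuel) := by
  induction fuel with
  | zero => intro x low high _ _ _ _ h; omega
  | succ n ih =>
    intro x low high h1 h2 h3 h4 hfuel
    have hmid := PySem.Int.floordiv_two_mid_bounds h2
    generalize hmiddef : PySem.Int.floordiv (low + high) 2 = mid at hmid ⊢
    have hTm : PySem.Int.floordiv ((mid-1)*mid) 2 = T (mid - 1) := by
      unfold T; ring_nf
    have hTm2 : PySem.Int.floordiv (mid*(mid+1)) 2 = T mid := rfl
    have hTm3 : PySem.Int.floordiv (mid*(mid-1)) 2 = T (mid - 1) := by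
      unfold T; ring_nf
    simp only [findLoop, hTm, hTm2, hTm3]
    split
    · rename_i hcond
      split
      · -- x > T mid : low := mid+1
        rename_i hgt
        have hmlt : mid < high := by
          by_contra h
          have heq : mid = high := by omega
          rw [heq] at hgt; omega
        exact ih x (mid+1) high (by omega) (by omega)
          (by rw [show mid + 1 - 1 = mid from by ring]; omega) h4 (by omega)
      · -- T (mid-1) ≥ x : high := mid
        rename_i hle
        have hge : T (mid - 1) ≥ x := by
          rcases hcond with h | h
          · exact h
          · omega
        have hllt : low < mid := by
          by_contra h
          have heq : mid = low := by omega
          rw [heq] at hge; omega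
        have hmhigh : mid < high := by
          rw [← hmiddef, PySem.Int.floordiv_lt_iff_lt_mul (by norm_num)]
          omega
        exact ih x low mid h1 (by omega) h3 (by omega) (by omega)
    · rename_i hcond
      rw [not_or, not_le, not_lt] at hcond
      exact ⟨by omega, hcond.1, hcond.2, by dsimp only⟩

theorem T_0 : T 0 = 0 := by decide
theorem T_141 : T 141 = 10011 := by decide
theorem T_2001 : (10011 : Int) ≤ T 2001 := by decide

theorem B_good {x : Int} (h1 : 1 ≤ x) (h2 : x ≤ 10011) : Good x (find_alt x) := by
  have := B_loop_good 2000 x 1 1 (by norm_num) (by decide) (by rw [show (1:Int) - 1 = 0 by ring, T_0]; omega)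
    (by have := T_2001; norm_num; omega)
  simpa [find_alt] using this

theorem A_good {x : Int} (h1 : 1 ≤ x) (h2 : x ≤ 10011) : Good x (find x) := by
  have := A_loop_good 200 x 1 141 (by norm_num) (by norm_num)
    (by rw [show (1:Int) - 1 = 0 by ring, T_0]; omega)
    (by rw [T_141]; omega) (by norm_num)
  simpa [find] using this

-- ===== VERDICT (by name: the statement is the Claim_ definition above) =====
theorem find_spec : Claim_equal_find := by
  intro x _ hpre
  unfold Spec_find
  exact Good_unique (A_good hpre.1 hpre.2) (B_good hpre.1 hpre.2)
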